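-- pv_equiv track=rewrite | github.com/Navdevl/chris-cred-reader | src/bank_parsers/rbl_parser.py | _is_summary_line
-- ===== SOURCE A (Python) =====
-- def _is_summary_line(line: str) -> bool:
--     """Check if line is a summary/non-transaction line"""
--     line_lower = line.lower()
--     summary_patterns = [
--         'total amount due',
--         'min. amt. due',
--         'payment due date',
--         'card number',
--         'available reward',
--         'points to expire',
--         'opening balance',
--         'closing balance',
--         'fuel surcharge',
--         'bonus points',
--         'membership fee',
--         't&cs apply',
--         'use code',
--         'valid till',
--         'rblfares',
--         'opt for',
--         'download',
--         'pay utility'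
--     ]
--
--     return any(pattern in line_lower for pattern in summary_patterns)
-- ===== SOURCE B (Python) =====
-- def _is_summary_line(line: str) -> bool:
--     """Check if line is a summary/non-transaction line"""
--     s = line.lower()
--     pats = [
--         'total amount due',
--         'min. amt. due',
--         'payment due date',
--         'card number',
--         'available reward',
--         'points to expire',
--         'opening balance',
--         'closing balance',
--         'fuel surcharge',
--         'bonus points',
--         'membership fee',
--         't&cs apply',
--         'use code',
--         'valid till',
--         'rblfares',
--         'opt for',
--         'download',
--         'pay utility'
--     ]
--     # one left-to-right scan: at each position, try patterns anchored there
--     # (first-character guard skips almost every pattern without a string compare)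
--     for i in range(len(s)):
--         c = s[i]
--         for p in pats:
--             if p[0] == c and s.startswith(p, i):
--                 return True
--     return False
-- ===== Notes on version B (the rewrite author's own statement) =====
-- stated objective: alternative
-- what changed: Inverted the loop structure: instead of one full substring search per pattern (18 scans of the line), B makes a single left-to-right scan over positions and checks anchored prefixes there, with a first-character guard that rejects most patterns per position without comparing strings.
import Mathlib
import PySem

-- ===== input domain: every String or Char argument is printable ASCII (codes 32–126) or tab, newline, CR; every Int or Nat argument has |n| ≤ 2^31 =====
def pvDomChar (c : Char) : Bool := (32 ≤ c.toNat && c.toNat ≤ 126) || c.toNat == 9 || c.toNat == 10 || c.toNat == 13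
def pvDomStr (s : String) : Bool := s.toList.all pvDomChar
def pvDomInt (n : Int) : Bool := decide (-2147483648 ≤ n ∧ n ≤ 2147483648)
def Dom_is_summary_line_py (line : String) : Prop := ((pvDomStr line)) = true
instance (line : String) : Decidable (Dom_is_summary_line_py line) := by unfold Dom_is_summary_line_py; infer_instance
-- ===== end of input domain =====

-- B replaces A's per-pattern substring searches by a single left-to-right scan of the line,
-- checking anchored prefixes at each position with a first-character guard (alternative structure).


-- ===== PORT A =====
def patsA : List String :=
  ["total amount due", "min. amt. due", "payment due date", "card number",
   "available reward", "points to expire", "opening balance", "closing balance",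
   "fuel surcharge", "bonus points", "membership fee", "t&cs apply",
   "use code", "valid till", "rblfares", "opt for", "download", "pay utility"]

def is_summary_line_py (line : String) : Bool :=
  let line_lower := PySem.Str.lower line
  patsA.any (fun pattern => PySem.Str.isIn pattern line_lower)

-- ===== PORT B =====
def patsB : List String :=
  ["total amount due", "min. amt. due", "payment due date", "card number",
   "available reward", "points to expire", "opening balance", "closing balance",
   "fuel surcharge", "bonus points", "membership fee", "t&cs apply",
   "use code", "valid till", "rblfares", "opt for", "download", "pay utility"]

-- the Python index loop 'for i in range(len(s))' becomes structural recursion on the suffix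
-- s[i:] (exact: s.startswith(p, i) is p.toList.isPrefixOf of that suffix, s[i] is its head).
def scanB : List Char → Bool
  | [] => false
  | c :: rest =>
      (patsB.any fun p => (p.toList.headD ' ' == c) && p.toList.isPrefixOf (c :: rest)) || scanB rest

def is_summary_line_py_alt (line : String) : Bool :=
  scanB (PySem.Str.lower line).toList

-- ===== PRECONDITION & SPEC =====
def Spec_is_summary_line_py (line : String) (out : Bool) : Prop := out = is_summary_line_py_alt line
instance (line : String) (out : Bool) : Decidable (Spec_is_summary_line_py line out) := by unfold Spec_is_summary_line_py; infer_instance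

-- ===== CLAIM (what is proved, stated in full; the proofs are below) =====
def Claim_equal_is_summary_line_py : Prop := ∀ (line : String), Dom_is_summary_line_py line → Spec_is_summary_line_py line (is_summary_line_py line)

-- ===== LEMMAS AND PROOFS =====

-- the first-character guard is redundant for a nonempty pattern anchored at c
theorem guard_eq (p : String) (hp : p.toList ≠ []) (c : Char) (rest : List Char) :
    ((p.toList.headD ' ' == c) && p.toList.isPrefixOf (c :: rest)) =
      p.toList.isPrefixOf (c :: rest) := by
  cases h : p.toList with
  | nil => exact absurd h hp
  | cons hd tl =>
      simp only [List.headD_cons, List.isPrefixOf]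
      cases hhd : (hd == c) <;> simp

theorem scanB_iff (l : List Char) :
    scanB l = true ↔ ∃ p ∈ patsB, p.toList <:+: l := by
  induction l with
  | nil =>
      simp only [scanB, Bool.false_eq_true, false_iff]
      decide
  | cons c rest ih =>
      have hg : (patsB.any fun p => (p.toList.headD ' ' == c) && p.toList.isPrefixOf (c :: rest))
          = patsB.any fun p => p.toList.isPrefixOf (c :: rest) := by
        have hne : ∀ p ∈ patsB, p.toList ≠ [] := by decide
        rw [Bool.eq_iff_iff]
        simp only [List.any_eq_true]
        exact ⟨fun ⟨p, hp, h⟩ => ⟨p, hp, (guard_eq p (hne p hp) c rest) ▸ h⟩,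
               fun ⟨p, hp, h⟩ => ⟨p, hp, (guard_eq p (hne p hp) c rest).symm ▸ h⟩⟩
      simp only [scanB, hg, Bool.or_eq_true, List.any_eq_true,
        List.isPrefixOf_iff_prefix, ih, List.infix_cons_iff]
      constructor
      · rintro (⟨p, hp, h⟩ | ⟨p, hp, h⟩) <;> exact ⟨p, hp, by tauto⟩
      · rintro ⟨p, hp, h | h⟩
        · exact Or.inl ⟨p, hp, h⟩
        · exact Or.inr ⟨p, hp, h⟩

-- ===== VERDICT (by name: the statement is the Claim_ definition above) =====
theorem is_summary_line_py_spec : Claim_equal_is_summary_line_py := by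
  intro line _
  unfold Spec_is_summary_line_py is_summary_line_py is_summary_line_py_alt
  rw [Bool.eq_iff_iff, scanB_iff]
  simp only [List.any_eq_true, PySem.Str.isIn_iff_infix]
  exact Iff.rfl
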